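-- pv_equiv track=rewrite | github.com/8-oo-8/python_files | dictionaryTest1.py | repeat_word_count
-- ===== SOURCE A (Python) =====
-- def repeat_word_count(text, n):
--     dic = {}
--     tem = text.split()
--     res = []
--
--     for i in tem:
--         if i in dic:
--             dic[i] += 1
--         else:
--             dic[i] = 1
--
--     for key in dic.keys():
--         if dic[key] >= n:
--             res.append(key)
--     res.sort()
--     return res
-- ===== SOURCE B (Python) =====
-- def repeat_word_count(text, n):
--     toks = sorted(text.split())
--     res = []
--     while toks:
--         x = toks[0]
--         k = 1
--         while k < len(toks) and toks[k] == x: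
--             k += 1
--         if k >= n:
--             res.append(x)
--         toks = toks[k:]
--     return res
-- ===== Notes on version B (the rewrite author's own statement) =====
-- stated objective: alternative
-- what changed: B sorts the whole token list once and run-length-scans consecutive equal runs, emitting each word whose run length is >= n already in sorted order, instead of A's dict-counting pass followed by a key filter and a final sort.
import Mathlib
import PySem

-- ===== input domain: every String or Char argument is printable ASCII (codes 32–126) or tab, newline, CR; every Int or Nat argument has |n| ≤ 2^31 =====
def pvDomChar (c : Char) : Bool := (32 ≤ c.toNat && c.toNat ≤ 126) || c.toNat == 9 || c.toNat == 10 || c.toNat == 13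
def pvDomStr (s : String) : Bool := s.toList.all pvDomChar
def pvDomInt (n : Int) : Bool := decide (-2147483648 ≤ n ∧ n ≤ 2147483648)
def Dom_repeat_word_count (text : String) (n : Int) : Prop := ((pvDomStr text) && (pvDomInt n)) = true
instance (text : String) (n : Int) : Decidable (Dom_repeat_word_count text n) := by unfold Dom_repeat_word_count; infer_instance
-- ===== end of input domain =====

-- B counts words by sorting the tokens once and scanning runs of equal neighbours (no dict, no final
-- sort), an alternative of the same cost as A's dict-count-filter-sort; return values proved equal.

-- ===== PORT A =====
def repeat_word_count (text : String) (n : Int) : List String :=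
  let dic : PySem.Dict String Int := PySem.Dict.empty
  let tem := PySem.Str.split₀ text
  let res : List String := []
  let dic := tem.foldl (fun d i => if d.contains i then d.insert i (d.getD i 0 + 1) else d.insert i 1) dic
  let res := dic.keys.foldl (fun r key => if n ≤ dic.getD key 0 then r ++ [key] else r) res
  PySem.List.sorted res (fun x => x) false

-- ===== PORT B =====
-- the outer while loop of Source B: take the run of tokens equal to the head, keep the head if the
-- run length is ≥ n, continue on the remainder (the inner counting while = takeWhile length)
def pvRunScan (n : Int) : List String → List String
  | [] => []
  | x :: rest =>
      if n ≤ 1 + ((rest.takeWhile (fun y => y == x)).length : Int) then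
        x :: pvRunScan n (rest.dropWhile (fun y => y == x))
      else pvRunScan n (rest.dropWhile (fun y => y == x))
termination_by l => l.length
decreasing_by
  all_goals
    simp only [List.length_cons]
    have := List.length_dropWhile_le (p := fun y => y == x) (l := rest)
    omega

def repeat_word_count_alt (text : String) (n : Int) : List String :=
  pvRunScan n (PySem.List.sorted (PySem.Str.split₀ text) (fun x => x) false)

-- ===== PRECONDITION & SPEC =====
def Spec_repeat_word_count (text : String) (n : Int) (out : List String) : Prop := out = repeat_word_count_alt text n
instance (text : String) (n : Int) (out : List String) : Decidable (Spec_repeat_word_count text n out) := by unfold Spec_repeat_word_count; infer_instance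

-- ===== CLAIM (what is proved, stated in full; the proofs are below) =====
def Claim_equal_repeat_word_count : Prop := ∀ (text : String) (n : Int), Dom_repeat_word_count text n → Spec_repeat_word_count text n (repeat_word_count text n)

-- ===== LEMMAS AND PROOFS =====

-- in a ≤-sorted list, after dropping the leading run of x no x remains
theorem pv_not_mem_dropWhile (rest : List String) (x : String)
    (hp : rest.Pairwise (fun a b => a ≤ b)) (hge : ∀ y ∈ rest, x ≤ y) :
    x ∉ rest.dropWhile (fun y => y == x) := by
  induction rest with
  | nil => simp
  | cons z tl ih =>
    by_cases hz : (z == x) = true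
    · simp only [List.dropWhile_cons, hz, if_pos]
      exact ih hp.tail (fun y hy => hge y (List.mem_cons_of_mem _ hy))
    · simp only [List.dropWhile_cons, hz, if_neg, Bool.false_eq_true, not_false_iff]
      intro hmem
      rcases List.mem_cons.mp hmem with h | h
      · exact hz (by simp [h])
      · have h1 : z ≤ x := (List.pairwise_cons.mp hp).1 x h
        have h2 : x ≤ z := hge z (List.mem_cons_self)
        exact hz (by simp [le_antisymm h1 h2])

theorem pv_lt_of_mem_dropWhile (rest : List String) (x : String)
    (hp : rest.Pairwise (fun a b => a ≤ b)) (hge : ∀ y ∈ rest, x ≤ y)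
    {y : String} (hy : y ∈ rest.dropWhile (fun z => z == x)) : x < y := by
  have hmem : y ∈ rest := (List.dropWhile_sublist _).mem hy
  have hne : y ≠ x := fun h => pv_not_mem_dropWhile rest x hp hge (h ▸ hy)
  exact lt_of_le_of_ne (hge y hmem) (Ne.symm hne)

-- count of the head x in the whole sorted list = 1 + length of the leading run
theorem pv_count_head (rest : List String) (x : String)
    (hp : rest.Pairwise (fun a b => a ≤ b)) (hge : ∀ y ∈ rest, x ≤ y) :
    (x :: rest).count x = 1 + (rest.takeWhile (fun y => y == x)).length := by
  have hsplit : rest = rest.takeWhile (fun y => y == x) ++ rest.dropWhile (fun y => y == x) :=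
    (List.takeWhile_append_dropWhile).symm
  have htw : (rest.takeWhile (fun y => y == x)).count x = (rest.takeWhile (fun y => y == x)).length := by
    rw [List.count_eq_length]
    intro b hb
    have hbx := List.mem_takeWhile_imp hb
    simp only [beq_iff_eq] at hbx ⊢
    exact hbx.symm
  have hdw : (rest.dropWhile (fun y => y == x)).count x = 0 :=
    List.count_eq_zero.mpr (pv_not_mem_dropWhile rest x hp hge)
  calc (x :: rest).count x = rest.count x + 1 := by rw [List.count_cons_self]
    _ = 1 + (rest.takeWhile (fun y => y == x)).length := by
        conv_lhs => rw [hsplit]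
        rw [List.count_append, htw, hdw]; omega

-- count of any y ≠ x survives dropping the leading run of x
theorem pv_count_tail (rest : List String) (x y : String) (hne : y ≠ x) :
    (x :: rest).count y = (rest.dropWhile (fun z => z == x)).count y := by
  have hsplit : rest = rest.takeWhile (fun z => z == x) ++ rest.dropWhile (fun z => z == x) :=
    (List.takeWhile_append_dropWhile).symm
  have htw : (rest.takeWhile (fun z => z == x)).count y = 0 := by
    rw [List.count_eq_zero]
    intro hy
    exact hne (by simpa using List.mem_takeWhile_imp hy)
  conv_lhs => rw [hsplit]
  rw [List.count_cons, List.count_append, htw]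
  simp [Ne.symm hne]

theorem pv_mem_drop (rest : List String) (x y : String) (hyx : y ≠ x) (h : y ∈ rest) :
    y ∈ rest.dropWhile (fun z => z == x) := by
  have : y ∈ rest.takeWhile (fun z => z == x) ++ rest.dropWhile (fun z => z == x) := by
    rw [List.takeWhile_append_dropWhile]; exact h
  rcases List.mem_append.mp this with h' | h'
  · exact absurd (by simpa using List.mem_takeWhile_imp h') hyx
  · exact h'

theorem pv_mem_runScan (n : Int) (l : List String) (hp : l.Pairwise (fun a b => a ≤ b))
    (y : String) : y ∈ pvRunScan n l ↔ y ∈ l ∧ n ≤ (l.count y : Int) := by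
  match l with
  | [] => simp [pvRunScan]
  | x :: rest =>
    have hge : ∀ z ∈ rest, x ≤ z := (List.pairwise_cons.mp hp).1
    have hprest : rest.Pairwise (fun a b => a ≤ b) := hp.tail
    have hpd : (rest.dropWhile (fun z => z == x)).Pairwise (fun a b => a ≤ b) :=
      hprest.sublist (List.dropWhile_sublist _)
    have IH := pv_mem_runScan n (rest.dropWhile (fun z => z == x)) hpd y
    have hxcnt := pv_count_head rest x hprest hge
    rw [pvRunScan]
    by_cases hn : n ≤ 1 + ((rest.takeWhile (fun y => y == x)).length : Int)
    · rw [if_pos hn]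
      by_cases hyx : y = x
      · subst hyx
        constructor
        · intro _
          refine ⟨List.mem_cons_self, ?_⟩
          rw [hxcnt]; push_cast; omega
        · intro _; exact List.mem_cons_self
      · have hcnt := pv_count_tail rest x y hyx
        rw [hcnt]
        constructor
        · intro h
          rcases List.mem_cons.mp h with h | h
          · exact absurd h hyx
          · have := IH.mp h
            exact ⟨List.mem_cons_of_mem _ ((List.dropWhile_sublist _).mem this.1), this.2⟩
        · intro ⟨h1, h2⟩
          rcases List.mem_cons.mp h1 with h1 | h1
          · exact absurd h1 hyx
          · exact List.mem_cons_of_mem _ (IH.mpr ⟨pv_mem_drop rest x y hyx h1, h2⟩)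
    · rw [if_neg hn, IH]
      by_cases hyx : y = x
      · subst hyx
        have hynd : y ∉ rest.dropWhile (fun z => z == y) := pv_not_mem_dropWhile rest y hprest hge
        constructor
        · intro ⟨h1, _⟩; exact absurd h1 hynd
        · intro ⟨_, h2⟩
          rw [hxcnt] at h2; push_cast at h2; omega
      · have hcnt := pv_count_tail rest x y hyx
        rw [hcnt]
        constructor
        · intro ⟨h1, h2⟩
          exact ⟨List.mem_cons_of_mem _ ((List.dropWhile_sublist _).mem h1), h2⟩
        · intro ⟨h1, h2⟩
          rcases List.mem_cons.mp h1 with h1 | h1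
          · exact absurd h1 hyx
          · exact ⟨pv_mem_drop rest x y hyx h1, h2⟩
termination_by l.length
decreasing_by
  all_goals
    simp only [List.length_cons]
    have := List.length_dropWhile_le (p := fun z => z == x) (l := rest)
    omega

theorem pv_pairwise_runScan (n : Int) (l : List String) (hp : l.Pairwise (fun a b => a ≤ b)) :
    (pvRunScan n l).Pairwise (fun a b => a < b) := by
  match l with
  | [] => simp [pvRunScan]
  | x :: rest =>
    have hge : ∀ z ∈ rest, x ≤ z := (List.pairwise_cons.mp hp).1
    have hprest : rest.Pairwise (fun a b => a ≤ b) := hp.tail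
    have hpd : (rest.dropWhile (fun z => z == x)).Pairwise (fun a b => a ≤ b) :=
      hprest.sublist (List.dropWhile_sublist _)
    have IH := pv_pairwise_runScan n (rest.dropWhile (fun z => z == x)) hpd
    rw [pvRunScan]
    by_cases hn : n ≤ 1 + ((rest.takeWhile (fun y => y == x)).length : Int)
    · rw [if_pos hn, List.pairwise_cons]
      refine ⟨fun y hy => ?_, IH⟩
      have hyd : y ∈ rest.dropWhile (fun z => z == x) :=
        ((pv_mem_runScan n _ hpd y).mp hy).1
      exact pv_lt_of_mem_dropWhile rest x hprest hge hyd
    · rw [if_neg hn]; exact IH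
termination_by l.length
decreasing_by
  simp only [List.length_cons]
  have := List.length_dropWhile_le (p := fun z => z == x) (l := rest)
  omega

-- A's value in closed form: the distinct tokens with count ≥ n, sorted
theorem pv_A_closed (text : String) (n : Int) :
    repeat_word_count text n =
      PySem.List.sorted
        ((PySem.Set.ofList (PySem.Str.split₀ text)).filter
          (fun k => decide (n ≤ ((PySem.Str.split₀ text).count k : Int))))
        (fun x => x) false := by
  unfold repeat_word_count
  have hfun : (fun (d : PySem.Dict String Int) i =>
      if d.contains i then d.insert i (d.getD i 0 + 1) else d.insert i 1) =
      fun (d : PySem.Dict String Int) i => d.insert i (d.getD i 0 + 1) := by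
    funext d i
    by_cases h : d.contains i = true
    · simp [h]
    · simp only [Bool.not_eq_true] at h
      simp [h, PySem.Dict.getD_of_not_contains d 0 h]
  simp only [hfun, PySem.Dict.foldl_insert_getD_add_one_eq_counter]
  have hloop : (fun (r : List String) key =>
      if n ≤ (PySem.Dict.counter (PySem.Str.split₀ text)).getD key 0 then r ++ [key] else r) =
      fun (r : List String) key =>
        if (fun k => decide (n ≤ ((PySem.Str.split₀ text).count k : Int))) key = true
        then r ++ [id key] else r := by
    funext r key
    simp [PySem.Dict.getD_counter]
  rw [hloop, PySem.List.foldl_append_if, PySem.Dict.keys_counter]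
  simp [List.map_id]

-- ===== VERDICT (by name: the statement is the Claim_ definition above) =====
theorem repeat_word_count_spec : Claim_equal_repeat_word_count := by
  intro text n _
  unfold Spec_repeat_word_count repeat_word_count_alt
  rw [pv_A_closed]
  set tem := PySem.Str.split₀ text with htem
  set S := PySem.List.sorted tem (fun x => x) false with hS
  have hSperm : S.Perm tem := PySem.List.sorted_perm tem (fun x => x) false
  have hSp : S.Pairwise (fun a b => a ≤ b) := PySem.List.sorted_pairwise tem (fun x => x)
  have hpair : (pvRunScan n S).Pairwise (fun a b => a < b) := pv_pairwise_runScan n S hSp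
  refine PySem.List.sorted_eq_of_perm_of_pairwise_lt _ _ _ ?_ hpair
  have hnd1 : (pvRunScan n S).Nodup := hpair.imp (fun h => ne_of_lt h)
  have hnd2 : ((PySem.Set.ofList tem).filter
      (fun k => decide (n ≤ (tem.count k : Int)))).Nodup :=
    (PySem.Set.nodup_ofList tem).filter _
  rw [List.perm_ext_iff_of_nodup hnd1 hnd2]
  intro y
  rw [pv_mem_runScan n S hSp y, List.mem_filter]
  rw [hSperm.mem_iff, hSperm.count_eq, PySem.Set.mem_ofList]
  simp
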